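-- pv_equiv track=rewrite | github.com/shade-econ/sequence-jacobian | utils.py | complete_reverse_graph
-- ===== SOURCE A (Python) =====
-- def complete_reverse_graph(gph):
--     """Given directed graph represented as a dict from nodes to iterables of nodes, return representation of graph that
--     is complete (i.e. has each vertex pointing to some iterable, even if empty), and a complete version of reversed too.
--     Have returns be sets, for easy removal"""
--
--     revgph = {n: set() for n in gph}
--     for n, e in gph.items():
--         for n2 in e:
--             n2_edges = revgph.setdefault(n2, set())
--             n2_edges.add(n)
--
--     gph_missing_n = revgph.keys() - gph.keys()
--     gph = {**{k: set(v) for k, v in gph.items()}, **{n: set() for n in gph_missing_n}}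
--     return gph, revgph
-- ===== SOURCE B (Python) =====
-- def complete_reverse_graph(gph):
--     extra = dict.fromkeys(t for e in gph.values() for t in e if t not in gph)
--     allnodes = list(gph) + list(extra)
--     newgph = {n: set(gph.get(n, ())) for n in allnodes}
--     revgph = {n: {m for m, e in gph.items() if n in e} for n in allnodes}
--     return newgph, revgph
-- ===== Notes on version B (the rewrite author's own statement) =====
-- stated objective: simpler
-- what changed: Replaces A's setdefault-mutation pass and derived key-set-difference patch-up by first collecting all nodes (keys plus deduped new edge targets), then building both completed dicts by comprehensions, the reverse adjacency of each node computed by a membership filter over the edges instead of incremental dict mutation.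
import Mathlib
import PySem

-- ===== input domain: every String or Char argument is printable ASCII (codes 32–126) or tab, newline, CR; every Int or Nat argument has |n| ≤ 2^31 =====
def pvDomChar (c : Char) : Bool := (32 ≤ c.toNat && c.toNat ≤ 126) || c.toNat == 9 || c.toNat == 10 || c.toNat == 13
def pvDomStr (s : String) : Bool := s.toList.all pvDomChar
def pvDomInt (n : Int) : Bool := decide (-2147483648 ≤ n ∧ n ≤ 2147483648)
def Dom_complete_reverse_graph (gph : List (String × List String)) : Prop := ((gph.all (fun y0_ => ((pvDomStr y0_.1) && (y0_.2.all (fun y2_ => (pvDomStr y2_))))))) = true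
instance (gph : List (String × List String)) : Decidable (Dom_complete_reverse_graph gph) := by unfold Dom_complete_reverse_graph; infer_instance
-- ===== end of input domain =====

-- B gathers all nodes first and builds both completed dicts by comprehensions (reverse adjacency
-- by per-node membership filtering) instead of A's setdefault mutation plus key-set-difference patch-up;
-- objective: simpler. Equivalence of return values (A mutates nothing).

-- ===== PORT A =====
def complete_reverse_graph (gph : List (String × List String)) : (List (String × List String)) × (List (String × List String)) :=
  -- revgph = {n: set() for n in gph}
  let revgph0 : PySem.Dict String (List String) :=
    gph.foldl (fun d p => d.insert p.1 PySem.Set.empty) PySem.Dict.empty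
  -- for n, e in gph.items(): for n2 in e: revgph.setdefault(n2, set()).add(n)
  let revgph : PySem.Dict String (List String) :=
    gph.foldl (fun d p =>
      p.2.foldl (fun d n2 => d.modify n2 PySem.Set.empty (fun s => PySem.Set.add s p.1)) d) revgph0
  -- gph_missing_n = revgph.keys() - gph.keys()
  let gph_missing_n : List String := PySem.Set.diff revgph.keys (gph.map (·.1))
  -- gph = {**{k: set(v) for k, v in gph.items()}, **{n: set() for n in gph_missing_n}}
  let gout : PySem.Dict String (List String) :=
    gph.foldl (fun d p => d.insert p.1 (PySem.Set.ofList p.2)) PySem.Dict.empty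
  let gout2 : PySem.Dict String (List String) :=
    gph_missing_n.foldl (fun d n => d.insert n PySem.Set.empty) gout
  (gout2.items, revgph.items)

-- ===== PORT B =====
def complete_reverse_graph_alt (gph : List (String × List String)) : (List (String × List String)) × (List (String × List String)) :=
  let keys : List String := gph.map (·.1)
  -- extra = dict.fromkeys(t for e in gph.values() for t in e if t not in gph)
  let extra : List String := PySem.List.dedup ((gph.flatMap (·.2)).filter (fun t => !keys.contains t))
  let allnodes : List String := keys ++ extra
  -- newgph = {n: set(gph.get(n, ())) for n in allnodes}
  let newgph : List (String × List String) :=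
    allnodes.map (fun n => (n, PySem.Set.ofList (((gph.find? (fun p => p.1 == n)).map (·.2)).getD [])))
  -- revgph = {n: {m for m, e in gph.items() if n in e} for n in allnodes}
  let revgph : List (String × List String) :=
    allnodes.map (fun n => (n, PySem.Set.ofList ((gph.filter (fun p => p.2.contains n)).map (·.1))))
  (newgph, revgph)

-- ===== PRECONDITION & SPEC =====
-- Pre_ excludes association lists with duplicate keys: they do not represent a Python dict faithfully
-- (the dict literal collapses them before either function runs), so the list-level behaviour is a
-- representation artefact, not A's.
def Pre_complete_reverse_graph (gph : List (String × List String)) : Prop := (gph.map (·.1)).Nodup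
instance (gph : List (String × List String)) : Decidable (Pre_complete_reverse_graph gph) := by unfold Pre_complete_reverse_graph; infer_instance
def pvWitness_complete_reverse_graph : (List (String × List String)) := [("a", ["b", "a"]), ("c", [])]

def Spec_complete_reverse_graph (gph : List (String × List String)) (out : (List (String × List String)) × (List (String × List String))) : Prop := out = complete_reverse_graph_alt gph
instance (gph : List (String × List String)) (out : (List (String × List String)) × (List (String × List String))) : Decidable (Spec_complete_reverse_graph gph out) := by unfold Spec_complete_reverse_graph; infer_instance

-- ===== CLAIM (what is proved, stated in full; the proofs are below) =====
def Claim_equal_complete_reverse_graph : Prop := ∀ (gph : List (String × List String)), Dom_complete_reverse_graph gph → Pre_complete_reverse_graph gph → Spec_complete_reverse_graph gph (complete_reverse_graph gph)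

-- ===== LEMMAS AND PROOFS =====

-- find? of the first (unique) matching pair under nodup keys
theorem crg_find_first (gph : List (String × List String)) (hnd : (gph.map (·.1)).Nodup)
    (p : String × List String) (hp : p ∈ gph) : gph.find? (fun q => q.1 == p.1) = some p := by
  induction gph with
  | nil => cases hp
  | cons q rest ih =>
    simp only [List.map_cons, List.nodup_cons] at hnd
    rcases List.mem_cons.1 hp with h | h
    · subst h; simp
    · have hne : q.1 ≠ p.1 := by
        intro he; exact hnd.1 (he ▸ List.mem_map_of_mem h)
      rw [List.find?_cons_of_neg (by simp [hne])]
      exact ih hnd.2 h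

-- the dict {n: set() for n in gph} maps every key (present or not) to []
theorem crg_getD_init (gph : List (String × List String)) :
    ∀ (d : PySem.Dict String (List String)), (∀ n, d.getD n PySem.Set.empty = []) →
    ∀ n, (gph.foldl (fun d p => d.insert p.1 PySem.Set.empty) d).getD n PySem.Set.empty = [] := by
  induction gph with
  | nil => intro d h n; exact h n
  | cons p rest ih =>
    intro d h n
    refine ih _ ?_ n
    intro m
    rw [PySem.Dict.getD_insert]
    split
    · rfl
    · exact h m

-- inner loop: for n2 in e: revgph.setdefault(n2, set()).add(m)
theorem crg_inner_getD (e : List String) (m : String) :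
    ∀ (d : PySem.Dict String (List String)) (n : String),
    (e.foldl (fun d n2 => d.modify n2 PySem.Set.empty (fun s => PySem.Set.add s m)) d).getD n PySem.Set.empty
      = if e.contains n then PySem.Set.add (d.getD n PySem.Set.empty) m else d.getD n PySem.Set.empty := by
  induction e with
  | nil => intro d n; simp
  | cons a e ih =>
    intro d n
    simp only [List.foldl_cons]
    rw [ih]
    by_cases han : n = a
    · subst han
      rw [PySem.Dict.getD_modify_self]
      simp only [List.contains_cons, BEq.rfl, Bool.true_or, if_true]
      split
      · rw [PySem.Set.add_of_mem (by simp [PySem.Set.mem_add])]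
      · rfl
    · have h2 : (n == a) = false := by simp [han]
      rw [PySem.Dict.getD_modify]
      simp [han]

-- outer loop, lookup view
theorem crg_outer_getD (gph : List (String × List String)) :
    ∀ (d : PySem.Dict String (List String)) (n : String),
    (gph.foldl (fun d p => p.2.foldl (fun d n2 => d.modify n2 PySem.Set.empty (fun s => PySem.Set.add s p.1)) d) d).getD n PySem.Set.empty
      = ((gph.filter (fun p => p.2.contains n)).map (·.1)).foldl PySem.Set.add (d.getD n PySem.Set.empty) := by
  induction gph with
  | nil => intro d n; rfl
  | cons p rest ih =>
    intro d n
    simp only [List.foldl_cons, List.filter_cons]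
    by_cases hc : p.2.contains n = true
    · rw [if_pos hc]
      simp only [List.map_cons, List.foldl_cons]
      rw [ih, crg_inner_getD, if_pos hc]
    · rw [if_neg hc, ih, crg_inner_getD, if_neg hc]

-- outer loop, keys view
theorem crg_outer_keys (gph : List (String × List String)) :
    ∀ (d : PySem.Dict String (List String)),
    (gph.foldl (fun d p => p.2.foldl (fun d n2 => d.modify n2 PySem.Set.empty (fun s => PySem.Set.add s p.1)) d) d).keys
      = PySem.Set.update d.keys (gph.flatMap (·.2)) := by
  induction gph with
  | nil => intro d; rfl
  | cons p rest ih =>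
    intro d
    simp only [List.foldl_cons, List.flatMap_cons]
    rw [ih, PySem.Dict.keys_foldl_modify]
    simp [PySem.Set.update, List.foldl_append]

-- a Set.add loop from s ++ acc splits off s
theorem crg_update_split (ts : List String) :
    ∀ (s acc : List String), (∀ x ∈ acc, x ∉ s) →
    ts.foldl PySem.Set.add (s ++ acc) = s ++ (ts.filter (fun t => !s.contains t)).foldl PySem.Set.add acc := by
  induction ts with
  | nil => intro s acc _; rfl
  | cons t ts ih =>
    intro s acc h
    simp only [List.foldl_cons, List.filter_cons]
    by_cases hts : t ∈ s
    · rw [PySem.Set.add_of_mem (by simp [hts]), if_neg (by simp [hts])]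
      exact ih s acc h
    · rw [if_pos (by simp [hts])]
      by_cases hta : t ∈ acc
      · rw [PySem.Set.add_of_mem (by simp [hta]), List.foldl_cons,
          PySem.Set.add_of_mem hta]
        exact ih s acc h
      · rw [PySem.Set.add_of_not_mem (by simp [hts, hta]), List.foldl_cons,
          PySem.Set.add_of_not_mem hta, List.append_assoc]
        refine ih s (acc ++ [t]) ?_
        intro x hx
        rcases List.mem_append.1 hx with hx | hx
        · exact h x hx
        · simp at hx; subst hx; exact hts

-- Set.diff is a filter
theorem crg_diff_filter (s t : List String) :
    PySem.Set.diff s t = s.filter (fun x => !t.contains x) := by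
  simp [PySem.Set.diff]

-- ===== VERDICT (by name: the statement is the Claim_ definition above) =====
theorem complete_reverse_graph_spec : Claim_equal_complete_reverse_graph := by
  intro gph _ hnd0
  have hnd : (gph.map (·.1)).Nodup := hnd0
  unfold Spec_complete_reverse_graph complete_reverse_graph complete_reverse_graph_alt
  simp only []
  set keys := gph.map (·.1) with hkeys
  set ts := gph.flatMap (·.2) with hts
  set extra := PySem.List.dedup (ts.filter (fun t => !keys.contains t)) with hextra
  have hextra_not : ∀ n ∈ extra, n ∉ keys := by
    intro n hn
    rw [hextra] at hn
    have := (PySem.List.mem_dedup _ _).1 hn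
    have := List.mem_filter.1 this
    simpa using this.2
  have hextra_nodup : extra.Nodup := PySem.List.nodup_dedup _
  have hall_nodup : (keys ++ extra).Nodup :=
    List.Nodup.append hnd hextra_nodup (by
      intro x hx hx'
      exact hextra_not x hx' hx)
  -- revgph0
  have h0keys : (gph.foldl (fun d p => d.insert p.1 PySem.Set.empty) (PySem.Dict.empty : PySem.Dict String (List String))).keys = keys := by
    rw [PySem.Dict.keys_foldl_insert_key, PySem.Dict.keys_empty]
    show PySem.Set.ofList keys = keys
    exact PySem.Set.ofList_eq_self_of_nodup _ hnd
  have h0getD : ∀ n, (gph.foldl (fun d p => d.insert p.1 PySem.Set.empty) (PySem.Dict.empty : PySem.Dict String (List String))).getD n PySem.Set.empty = [] :=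
    crg_getD_init gph PySem.Dict.empty (fun n => PySem.Dict.getD_empty ..)
  -- revgph
  have hupd : PySem.Set.update keys ts = keys ++ extra := by
    show ts.foldl PySem.Set.add keys = keys ++ extra
    have := crg_update_split ts keys [] (by intro x hx; cases hx)
    rw [List.append_nil] at this
    rw [this, hextra, PySem.List.dedup_eq_ofList, PySem.Set.ofList_eq_foldl]
  have hrevkeys : (gph.foldl (fun d p => p.2.foldl (fun d n2 => d.modify n2 PySem.Set.empty (fun s => PySem.Set.add s p.1)) d)
      (gph.foldl (fun d p => d.insert p.1 PySem.Set.empty) (PySem.Dict.empty : PySem.Dict String (List String)))).keys = keys ++ extra := by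
    rw [crg_outer_keys, h0keys, ← hts, hupd]
  have hrevgetD : ∀ n, (gph.foldl (fun d p => p.2.foldl (fun d n2 => d.modify n2 PySem.Set.empty (fun s => PySem.Set.add s p.1)) d)
      (gph.foldl (fun d p => d.insert p.1 PySem.Set.empty) (PySem.Dict.empty : PySem.Dict String (List String)))).getD n PySem.Set.empty
      = PySem.Set.ofList ((gph.filter (fun p => p.2.contains n)).map (·.1)) := by
    intro n
    rw [crg_outer_getD, h0getD n, PySem.Set.ofList_eq_foldl]
  -- second component
  have hsnd : (gph.foldl (fun d p => p.2.foldl (fun d n2 => d.modify n2 PySem.Set.empty (fun s => PySem.Set.add s p.1)) d)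
      (gph.foldl (fun d p => d.insert p.1 PySem.Set.empty) (PySem.Dict.empty : PySem.Dict String (List String)))).items
      = (keys ++ extra).map (fun n => (n, PySem.Set.ofList ((gph.filter (fun p => p.2.contains n)).map (·.1)))) := by
    rw [PySem.Dict.items_eq_map_keys _ (hrevkeys ▸ hall_nodup) PySem.Set.empty, hrevkeys]
    exact List.map_congr_left (fun n _ => by rw [hrevgetD n])
  -- first component
  have hgout : (gph.foldl (fun d p => d.insert p.1 (PySem.Set.ofList p.2)) (PySem.Dict.empty : PySem.Dict String (List String))).items
      = gph.map (fun p => (p.1, PySem.Set.ofList p.2)) := by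
    have := PySem.Dict.items_foldl_insert_fresh (d := (PySem.Dict.empty : PySem.Dict String (List String)))
      (l := gph) (k := fun p => p.1) (v := fun p => PySem.Set.ofList p.2)
      (fun a _ => PySem.Dict.contains_empty ..) hnd
    simpa using this
  have hgoutkeys : (gph.foldl (fun d p => d.insert p.1 (PySem.Set.ofList p.2)) (PySem.Dict.empty : PySem.Dict String (List String))).keys = keys := by
    rw [PySem.Dict.keys_foldl_insert_key, PySem.Dict.keys_empty]
    show PySem.Set.ofList keys = keys
    exact PySem.Set.ofList_eq_self_of_nodup _ hnd
  have hmissing : PySem.Set.diff (gph.foldl (fun d p => p.2.foldl (fun d n2 => d.modify n2 PySem.Set.empty (fun s => PySem.Set.add s p.1)) d)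
      (gph.foldl (fun d p => d.insert p.1 PySem.Set.empty) (PySem.Dict.empty : PySem.Dict String (List String)))).keys keys = extra := by
    rw [hrevkeys, crg_diff_filter, List.filter_append]
    rw [List.filter_eq_nil_iff.2 (by intro x hx; simp [hx]), List.nil_append]
    exact List.filter_eq_self.2 (fun x hx => by simp [hextra_not x hx])
  have hfst : (extra.foldl (fun d n => d.insert n PySem.Set.empty)
      (gph.foldl (fun d p => d.insert p.1 (PySem.Set.ofList p.2)) (PySem.Dict.empty : PySem.Dict String (List String)))).items
      = gph.map (fun p => (p.1, PySem.Set.ofList p.2)) ++ extra.map (fun n => (n, PySem.Set.empty)) := by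
    have := PySem.Dict.items_foldl_insert_fresh
      (d := gph.foldl (fun d p => d.insert p.1 (PySem.Set.ofList p.2)) (PySem.Dict.empty : PySem.Dict String (List String)))
      (l := extra) (k := fun n => n) (v := fun _ => PySem.Set.empty)
      (fun a ha => by
        have hak : a ∉ keys := hextra_not a ha
        rw [PySem.Dict.contains_eq_decide_mem_keys, hgoutkeys]
        simpa using hak)
      (by simpa using hextra_nodup)
    simpa [hgout] using this
  -- B's components
  have hBfst : (keys ++ extra).map (fun n => (n, PySem.Set.ofList (((gph.find? (fun p => p.1 == n)).map (·.2)).getD [])))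
      = gph.map (fun p => (p.1, PySem.Set.ofList p.2)) ++ extra.map (fun n => (n, PySem.Set.empty)) := by
    rw [List.map_append]
    congr 1
    · rw [hkeys, List.map_map]
      refine List.map_congr_left (fun p hp => ?_)
      simp only [Function.comp]
      rw [crg_find_first gph hnd p hp]
      rfl
    · refine List.map_congr_left (fun n hn => ?_)
      rw [List.find?_eq_none.2 (fun q hq => by
        have : q.1 ∈ keys := List.mem_map_of_mem hq
        have hne : q.1 ≠ n := fun he => hextra_not n hn (he ▸ this)
        simpa using hne)]
      rfl
  rw [hmissing]
  simp only [Prod.mk.injEq]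
  exact ⟨hfst.trans hBfst.symm, hsnd⟩
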